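-- pv_equiv track=rewrite | github.com/LanderStandart/export_csv_tomail | PYTHON/ASNA/export.py | clear_psql
-- ===== SOURCE A (Python) =====
-- def clear_psql(sql):
--     del_id = []
--     for str in range(len(sql)):
--         res = sql[str].find('/**')
--         res2 = sql[str].find('SET SQL')
--         len_str = len(sql[str])
--
--         if res != -1 or len_str < 4 or res2 !=-1:
--             del_id.append(str)
--
--     del_id.sort(reverse=True)
--     for i in del_id:
--         del sql[i]
--     return sql
-- ===== SOURCE B (Python) =====
-- def clear_psql(sql):
--     w = 0
--     for i in range(len(sql)):
--         line = sql[i]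
--         if '/**' not in line and len(line) >= 4 and 'SET SQL' not in line:
--             sql[w] = line
--             w += 1
--     del sql[w:]
--     return sql
-- ===== Notes on version B (the rewrite author's own statement) =====
-- stated objective: faster
-- what changed: A collects the indices of bad lines, sorts them in descending order and deletes them one by one (each del shifts the tail); B is a single forward pass with a write pointer that compacts the kept lines in place and truncates the tail once.
import Mathlib
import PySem

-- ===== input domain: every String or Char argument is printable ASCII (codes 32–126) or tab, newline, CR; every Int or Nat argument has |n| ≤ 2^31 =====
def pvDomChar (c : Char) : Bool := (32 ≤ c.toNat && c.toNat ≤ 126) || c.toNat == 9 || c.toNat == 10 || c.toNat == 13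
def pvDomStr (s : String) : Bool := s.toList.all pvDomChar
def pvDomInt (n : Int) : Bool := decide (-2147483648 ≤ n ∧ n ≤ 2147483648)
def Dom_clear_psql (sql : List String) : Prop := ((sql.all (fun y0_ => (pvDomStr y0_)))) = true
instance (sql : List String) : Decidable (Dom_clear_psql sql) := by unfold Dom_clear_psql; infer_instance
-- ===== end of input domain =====

-- B replaces A's collect-bad-indices / sort-descending / multi-delete passes by a single
-- forward pass with a write pointer (simpler, one pass). Both A and B mutate the Python
-- argument list in place the same way; the theorems below are about the return value.

-- ===== PORT A =====
def clear_psql (sql : List String) : List String :=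
  let del_id : List Int :=
    (PySem.List.pyRange 0 (PySem.List.len sql) 1).foldl (fun acc str =>
      let res := PySem.Str.find (PySem.List.pyGetD sql str "") "/**"
      let res2 := PySem.Str.find (PySem.List.pyGetD sql str "") "SET SQL"
      let len_str := PySem.Str.len (PySem.List.pyGetD sql str "")
      if res != -1 || decide (len_str < 4) || res2 != -1 then acc ++ [str] else acc) []
  let del_id2 := PySem.List.sorted del_id (fun x => x) true
  del_id2.foldl (fun l i => ((PySem.List.pop? l i).map Prod.snd).getD l) sql

-- ===== PORT B =====
def clear_psql_alt (sql : List String) : List String :=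
  let st := (PySem.List.pyRange 0 (PySem.List.len sql) 1).foldl
    (fun (st : List String × Int) i =>
      let line := PySem.List.pyGetD st.1 i ""
      if !(PySem.Str.isIn "/**" line) && decide (4 ≤ PySem.Str.len line)
         && !(PySem.Str.isIn "SET SQL" line)
      then (PySem.List.pySetD st.1 st.2 line, st.2 + 1)
      else st) (sql, 0)
  PySem.List.slice st.1 none (some st.2)

-- ===== PRECONDITION & SPEC =====
def Spec_clear_psql (sql : List String) (out : List String) : Prop := out = clear_psql_alt sql
instance (sql : List String) (out : List String) : Decidable (Spec_clear_psql sql out) := by unfold Spec_clear_psql; infer_instance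

-- ===== CLAIM (what is proved, stated in full; the proofs are below) =====
def Claim_equal_clear_psql : Prop := ∀ (sql : List String), Dom_clear_psql sql → Spec_clear_psql sql (clear_psql sql)

-- ===== LEMMAS AND PROOFS =====

-- B's keep test
def keepB (line : String) : Bool :=
  !(PySem.Str.isIn "/**" line) && decide (4 ≤ PySem.Str.len line)
  && !(PySem.Str.isIn "SET SQL" line)

-- A's delete test
def badA (s : String) : Bool :=
  PySem.Str.find s "/**" != -1 || decide (PySem.Str.len s < 4) || PySem.Str.find s "SET SQL" != -1

lemma find_bne_eq_isIn (s sub : List Char) :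
    (PySem.Chars.find s sub != -1) = PySem.Chars.isIn sub s := by
  by_cases h : sub <:+: s
  · have h1 := (PySem.Chars.find_ne_neg_one_iff s sub).mpr h
    have h2 := (PySem.Chars.isIn_iff_infix sub s).mpr h
    simp [h2, bne_iff_ne, h1]
  · have h1 := (PySem.Chars.find_eq_neg_one_iff s sub).mpr h
    have h2 := (PySem.Chars.isIn_eq_false_iff sub s).mpr h
    simp [h2, h1]

lemma badA_eq_not_keepB (s : String) : badA s = !keepB s := by
  unfold badA keepB
  rw [PySem.Str.find_eq, PySem.Str.find_eq, PySem.Str.isIn_eq, PySem.Str.isIn_eq]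
  rw [find_bne_eq_isIn, find_bne_eq_isIn]
  have hd : (decide (PySem.Str.len s < 4)) = !(decide (4 ≤ PySem.Str.len s)) := by
    by_cases h : (4 : Int) ≤ PySem.Str.len s
    · simp only [h, decide_true, Bool.not_true, decide_eq_false_iff_not]
      omega
    · simp only [h, decide_false, Bool.not_false, decide_eq_true_eq]
      omega
  rw [hd]
  cases h1 : PySem.Chars.isIn "/**".toList s.toList <;>
  cases h2 : PySem.Chars.isIn "SET SQL".toList s.toList <;>
  cases h3 : decide (4 ≤ PySem.Str.len s) <;> rfl

-- one deletion step of A's last loop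
def delStep (l : List String) (i : Int) : List String :=
  ((PySem.List.pop? l i).map Prod.snd).getD l

-- the ascending list of indices A collects
def badIdxs (sql : List String) : List Nat :=
  (List.range sql.length).filter (fun i => badA (sql.getD i ""))

lemma delStep_cons_succ (x : String) (xs : List String) (d : Nat) :
    delStep (x :: xs) ((d : Int) + 1) = x :: delStep xs (d : Int) := by
  by_cases h : d < xs.length
  · have h1 : d + 1 < (x :: xs).length := by simpa using Nat.succ_lt_succ h
    have e : ((d : Int) + 1) = ((d + 1 : Nat) : Int) := by push_cast; ring
    rw [delStep, delStep, e, PySem.List.pop?_natCast _ _ h1, PySem.List.pop?_natCast _ _ h]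
    simp
  · have hblen : ¬ ((d : Int) < (xs.length : Int)) := by omega
    have hclen : ¬ ((d : Int) + 1 < ((x :: xs).length : Int)) := by
      simp only [List.length_cons]; push_cast; omega
    have e1 : PySem.List.pop? xs (d : Int) = none := by
      simp [PySem.List.pop?, PySem.List.pyIdx?, hblen]
    have e2 : PySem.List.pop? (x :: xs) ((d : Int) + 1) = none := by
      simp [PySem.List.pop?, PySem.List.pyIdx?, h]
      omega
    simp [delStep, e1, e2]

lemma foldl_delStep_map_succ (x : String) (ds : List Nat) :
    ∀ xs : List String,
      (ds.map (fun (d : Nat) => ((d : Int) + 1))).foldl delStep (x :: xs)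
        = x :: (ds.map (fun (d : Nat) => (d : Int))).foldl delStep xs := by
  induction ds with
  | nil => intro xs; rfl
  | cons d ds ih =>
    intro xs
    simp only [List.map_cons, List.foldl_cons, delStep_cons_succ]
    exact ih _

lemma badIdxs_cons (x : String) (xs : List String) :
    badIdxs (x :: xs) = (if badA x then [0] else []) ++ (badIdxs xs).map Nat.succ := by
  unfold badIdxs
  rw [List.length_cons, List.range_succ_eq_map]
  rw [List.filter_cons]
  simp only [List.getD_cons_zero, List.filter_map]
  have : ((fun i => badA ((x :: xs).getD i "")) ∘ Nat.succ) = fun i => badA (xs.getD i "") := by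
    funext i; simp
  rw [this]
  split <;> simp

lemma foldl_delStep_badIdxs :
    ∀ xs : List String,
      ((badIdxs xs).reverse.map (fun (d : Nat) => (d : Int))).foldl delStep xs = xs.filter keepB := by
  intro xs
  induction xs with
  | nil => rfl
  | cons x xs ih =>
    rw [badIdxs_cons]
    rw [List.reverse_append, List.map_append, List.foldl_append]
    have e1 : ((badIdxs xs).map Nat.succ).reverse.map (fun (d : Nat) => (d : Int))
        = (badIdxs xs).reverse.map (fun (d : Nat) => ((d : Int) + 1)) := by
      rw [← List.map_reverse, List.map_map]
      rfl
    rw [e1, foldl_delStep_map_succ, ih]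
    have hb := badA_eq_not_keepB x
    by_cases hk : keepB x = true
    · rw [hk] at hb; simp at hb
      simp [hb, hk]
    · have hk' : keepB x = false := by revert hk; cases keepB x <;> simp
      rw [hk'] at hb; simp at hb
      simp only [hb, if_true, List.reverse_cons, List.reverse_nil, List.nil_append,
        List.map_cons, List.map_nil, List.foldl_cons, List.foldl_nil]
      have h0 : delStep (x :: List.filter keepB xs) ((0 : Nat) : Int) = List.filter keepB xs := by
        rw [delStep, PySem.List.pop?_natCast _ _ (by simp)]
        simp
      rw [h0, List.filter_cons, hk']
      simp

-- A's first loop collects exactly the ascending bad indices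
lemma clear_psql_del_id (sql : List String) :
    ((PySem.List.pyRange 0 (PySem.List.len sql) 1).foldl (fun acc str =>
      let res := PySem.Str.find (PySem.List.pyGetD sql str "") "/**"
      let res2 := PySem.Str.find (PySem.List.pyGetD sql str "") "SET SQL"
      let len_str := PySem.Str.len (PySem.List.pyGetD sql str "")
      if res != -1 || decide (len_str < 4) || res2 != -1 then acc ++ [str] else acc) [])
      = (badIdxs sql).map (fun (d : Nat) => (d : Int)) := by
  rw [PySem.List.len_eq, PySem.List.pyRange_zero_natCast]
  have h := PySem.List.foldl_append_if
    (fun (i : Int) => badA (PySem.List.pyGetD sql i "")) (fun (i : Int) => i)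
    ((List.range sql.length).map (fun (k : Nat) => (k : Int))) []
  simp only [List.nil_append] at h
  show List.foldl (fun acc (i : Int) =>
        if badA (PySem.List.pyGetD sql i "") then acc ++ [i] else acc) []
        ((List.range sql.length).map (fun (k : Nat) => (k : Int))) = _
  rw [h, List.filter_map]
  unfold badIdxs
  simp only [List.map_map]
  congr 1
  apply List.filter_congr
  intro i _
  simp [PySem.List.pyGetD_natCast]

lemma clear_psql_sorted (sql : List String) :
    PySem.List.sorted ((badIdxs sql).map (fun (d : Nat) => (d : Int))) (fun x => x) true
      = (badIdxs sql).reverse.map (fun (d : Nat) => (d : Int)) := by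
  apply PySem.List.sorted_rev_eq_of_perm_of_pairwise_gt
  · exact ((badIdxs sql).reverse_perm).map _
  · rw [List.pairwise_map, List.pairwise_reverse]
    have h1 : (badIdxs sql).Pairwise (· < ·) :=
      List.Pairwise.sublist List.filter_sublist List.pairwise_lt_range
    exact h1.imp (fun h => by exact_mod_cast h)

lemma clear_psql_eq_filter (sql : List String) :
    clear_psql sql = sql.filter keepB := by
  show (PySem.List.sorted ((PySem.List.pyRange 0 (PySem.List.len sql) 1).foldl (fun acc str =>
      let res := PySem.Str.find (PySem.List.pyGetD sql str "") "/**"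
      let res2 := PySem.Str.find (PySem.List.pyGetD sql str "") "SET SQL"
      let len_str := PySem.Str.len (PySem.List.pyGetD sql str "")
      if res != -1 || decide (len_str < 4) || res2 != -1 then acc ++ [str] else acc) [])
      (fun x => x) true).foldl (fun l i => ((PySem.List.pop? l i).map Prod.snd).getD l) sql
      = sql.filter keepB
  rw [clear_psql_del_id, clear_psql_sorted]
  have h := foldl_delStep_badIdxs sql
  unfold delStep at h
  exact h

-- B's loop invariant: after the first k indices the array is the kept prefix followed by
-- the untouched tail, and the write pointer is the kept prefix's length.
set_option maxRecDepth 4096 in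
lemma clear_psql_alt_inv (sql : List String) :
    ∀ k, k ≤ sql.length →
      (((List.range k).map (fun (i : Nat) => (i : Int))).foldl
        (fun (st : List String × Int) i =>
          let line := PySem.List.pyGetD st.1 i ""
          if !(PySem.Str.isIn "/**" line) && decide (4 ≤ PySem.Str.len line)
             && !(PySem.Str.isIn "SET SQL" line)
          then (PySem.List.pySetD st.1 st.2 line, st.2 + 1)
          else st) (sql, 0))
      = (((sql.take k).filter keepB) ++ sql.drop ((sql.take k).filter keepB).length,
         (((sql.take k).filter keepB).length : Int)) := by
  intro k
  induction k with
  | zero => intro _; simp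
  | succ k ih =>
    intro hk1
    have hk : k < sql.length := Nat.lt_of_succ_le hk1
    rw [List.range_succ, List.map_append, List.foldl_append, ih (Nat.le_of_lt hk)]
    set K := (sql.take k).filter keepB with hK
    have hwk : K.length ≤ k := le_trans (List.length_filter_le _ _) (by simp [Nat.le_of_lt hk])
    have harrlen : (K ++ sql.drop K.length).length = sql.length := by
      simp
      omega
    have hline : PySem.List.pyGetD (K ++ sql.drop K.length) ((k : Int)) "" = sql[k] := by
      rw [PySem.List.pyGetD_natCast, List.getD_eq_getElem?_getD]
      rw [List.getElem?_append_right (by omega)]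
      rw [List.getElem?_drop]
      have : K.length + (k - K.length) = k := by omega
      rw [this, List.getElem?_eq_getElem hk]
      rfl
    have htake : sql.take (k + 1) = sql.take k ++ [sql[k]] := by
      rw [List.take_add_one, List.getElem?_eq_getElem hk]
      rfl
    simp only [List.map_cons, List.foldl_cons, List.map_nil, List.foldl_nil, hline]
    by_cases hkeep : keepB sql[k] = true
    · have hc : (!(PySem.Str.isIn "/**" sql[k]) && decide (4 ≤ PySem.Str.len sql[k])
             && !(PySem.Str.isIn "SET SQL" sql[k])) = true := hkeep
      rw [htake]
      rw [List.filter_append, List.filter_cons, hkeep]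
      simp only [List.filter_nil, hc, if_true]
      have hset : PySem.List.pySetD (K ++ sql.drop K.length) ((K.length : Int)) sql[k]
          = K ++ [sql[k]] ++ sql.drop (K.length + 1) := by
        rw [PySem.List.pySetD_natCast]
        have hd : sql.drop K.length = sql[K.length] :: sql.drop (K.length + 1) := by
          rw [List.drop_eq_getElem_cons (by omega)]
        rw [List.set_append_right _ _ (le_refl _)]
        rw [hd, Nat.sub_self]
        rw [List.set_cons_zero, List.append_assoc]
        rfl
      rw [hset, Prod.mk.injEq]
      refine ⟨?_, ?_⟩
      · rw [← hK]
        have hlen : (K ++ [sql[k]]).length = K.length + 1 := by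
          rw [List.length_append, List.length_cons, List.length_nil]
        rw [hlen]
      · rw [← hK]
        simp only [List.length_append, List.length_cons, List.length_nil]
        push_cast
        ring
    · have hc : (!(PySem.Str.isIn "/**" sql[k]) && decide (4 ≤ PySem.Str.len sql[k])
             && !(PySem.Str.isIn "SET SQL" sql[k])) = false := by
        revert hkeep; unfold keepB; cases h : _ && _ && _ <;> simp
      rw [htake, List.filter_append, List.filter_cons]
      simp only [hc, hkeep]
      simp [hK]

lemma clear_psql_alt_eq_filter (sql : List String) :
    clear_psql_alt sql = sql.filter keepB := by
  unfold clear_psql_alt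
  rw [PySem.List.len_eq, PySem.List.pyRange_zero_natCast]
  rw [clear_psql_alt_inv sql sql.length (le_refl _)]
  simp only [List.take_length]
  rw [PySem.List.slice_to_natCast]
  exact List.take_left

-- ===== VERDICT (by name: the statement is the Claim_ definition above) =====
theorem clear_psql_spec : Claim_equal_clear_psql := by
  intro sql _
  unfold Spec_clear_psql
  rw [clear_psql_eq_filter, clear_psql_alt_eq_filter]
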